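-- pv_equiv track=rewrite | github.com/hypernetix/hyperspot | testing/e2e/modules/file_parser/test_file_parser_upload.py | normalize_markdown
-- ===== SOURCE A (Python) =====
-- def normalize_markdown(text):
--     """
--     Normalize markdown text for comparison.
--
--     - Strips trailing whitespace on each line
--     - Normalizes line endings to \\n
--     - Strips leading/trailing blank lines
--     """
--     lines = text.replace("\r\n", "\n").replace("\r", "\n").split("\n")
--     normalized = [line.rstrip() for line in lines]
--
--     # Strip leading blank lines
--     while normalized and not normalized[0]:
--         normalized.pop(0)
--
--     # Strip trailing blank lines
--     while normalized and not normalized[-1]: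
--         normalized.pop()
--
--     return "\n".join(normalized)
-- ===== SOURCE B (Python) =====
-- def normalize_markdown(text):
--     lines = text.replace("\r\n", "\n").replace("\r", "\n").split("\n")
--     return "\n".join(line.rstrip() for line in lines).strip("\n")
-- ===== Notes on version B (the rewrite author's own statement) =====
-- stated objective: simpler
-- what changed: Replaces the list building plus the two while/pop loops that trim boundary blank lines with a single join of the rstripped lines followed by strip('\n') on the joined string (blank boundary lines become pure newline runs, since '\r' is gone and blanks rstrip to '').
import Mathlib
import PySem

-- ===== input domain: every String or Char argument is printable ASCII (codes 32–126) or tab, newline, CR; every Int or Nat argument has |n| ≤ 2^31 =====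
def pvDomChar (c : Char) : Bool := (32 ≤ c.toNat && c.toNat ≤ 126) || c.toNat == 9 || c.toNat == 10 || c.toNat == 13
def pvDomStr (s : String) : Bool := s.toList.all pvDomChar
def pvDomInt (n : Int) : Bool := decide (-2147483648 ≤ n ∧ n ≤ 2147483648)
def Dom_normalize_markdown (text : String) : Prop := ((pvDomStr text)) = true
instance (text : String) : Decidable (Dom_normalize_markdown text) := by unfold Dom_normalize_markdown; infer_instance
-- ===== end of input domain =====

-- B replaces A's two while/pop loops trimming boundary blank lines by a single strip('\n')
-- on the joined string (objective: simpler); same return value, no observable side effects.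

-- ===== PORT A =====
-- while normalized and not normalized[0]: normalized.pop(0)
def nmStripLead : List (List Char) → List (List Char)
  | [] => []
  | l :: ls => if l.isEmpty then nmStripLead ls else l :: ls

-- while normalized and not normalized[-1]: normalized.pop()  — the pop-from-end loop,
-- rendered exactly as the pop-from-front loop on the reversed list
def nmStripTrail (ls : List (List Char)) : List (List Char) :=
  (nmStripLead ls.reverse).reverse

def normalize_markdown (text : String) : String :=
  let s := PySem.Str.replace (PySem.Str.replace text "\r\n" "\n") "\r" "\n"
  let lines := PySem.Chars.splitOn s.toList ['\n']
  let normalized := lines.map PySem.Chars.rstrip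
  String.ofList (PySem.Chars.join ['\n'] (nmStripTrail (nmStripLead normalized)))

-- ===== PORT B =====
def normalize_markdown_alt (text : String) : String :=
  let s := PySem.Str.replace (PySem.Str.replace text "\r\n" "\n") "\r" "\n"
  let lines := PySem.Chars.splitOn s.toList ['\n']
  PySem.Str.stripChars (String.ofList (PySem.Chars.join ['\n'] (lines.map PySem.Chars.rstrip))) "\n"

-- ===== PRECONDITION & SPEC =====
def Spec_normalize_markdown (text : String) (out : String) : Prop := out = normalize_markdown_alt text
instance (text : String) (out : String) : Decidable (Spec_normalize_markdown text out) := by unfold Spec_normalize_markdown; infer_instance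

-- ===== CLAIM (what is proved, stated in full; the proofs are below) =====
def Claim_equal_normalize_markdown : Prop := ∀ (text : String), Dom_normalize_markdown text → Spec_normalize_markdown text (normalize_markdown text)

-- ===== LEMMAS AND PROOFS =====

-- structural (un-fueled) version of PySem.Chars.splitOn.go for a one-char separator
def nmGo (c : Char) : List Char → List Char → List (List Char) → List (List Char)
  | [], cur, acc => (cur.reverse :: acc).reverse
  | a :: rest, cur, acc =>
    if a = c then nmGo c rest [] (cur.reverse :: acc) else nmGo c rest (a :: cur) acc

theorem nmGo_eq_go (c : Char) (fuel : Nat) (l cur : List Char) (acc : List (List Char))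
    (h : l.length < fuel) :
    PySem.Chars.splitOn.go [c] fuel l cur acc = nmGo c l cur acc := by
  induction fuel generalizing l cur acc with
  | zero => omega
  | succ n ih =>
    cases l with
    | nil => simp [PySem.Chars.splitOn.go, nmGo]
    | cons a rest =>
      simp only [PySem.Chars.splitOn.go, nmGo, List.isPrefixOf,
        Bool.and_true, beq_iff_eq]
      by_cases hac : c = a
      · subst hac
        simp only [List.length_cons, List.drop_succ_cons]
        rw [ih _ _ _ (by simpa using Nat.lt_of_succ_lt_succ h)]
        simp [nmGo]
      · rw [if_neg hac, if_neg (fun hh => hac hh.symm), ih]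
        simpa using Nat.lt_of_succ_lt_succ h

theorem nmGo_no_sep (c : Char) (l cur : List Char) (acc : List (List Char))
    (hacc : ∀ p ∈ acc, c ∉ p) (hcur : c ∉ cur) :
    ∀ piece ∈ nmGo c l cur acc, c ∉ piece := by
  induction l generalizing cur acc with
  | nil =>
    intro piece hp
    simp only [nmGo, List.mem_reverse, List.mem_cons] at hp
    rcases hp with h | h
    · subst h; simpa using hcur
    · exact hacc _ h
  | cons a rest ih =>
    intro piece hp
    by_cases hac : a = c
    · subst hac
      simp only [nmGo] at hp
      refine ih [] (cur.reverse :: acc) ?_ (by simp) piece hp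
      intro p hpm
      rcases List.mem_cons.mp hpm with h | h
      · subst h; simpa using hcur
      · exact hacc _ h
    · simp only [nmGo, if_neg hac] at hp
      refine ih (a :: cur) acc hacc ?_ piece hp
      intro hmem
      rcases List.mem_cons.mp hmem with h | h
      · exact hac h.symm
      · exact hcur h

theorem splitOn_no_sep (c : Char) (s : List Char) :
    ∀ piece ∈ PySem.Chars.splitOn s [c], c ∉ piece := by
  rw [PySem.Chars.splitOn.eq_1, nmGo_eq_go c (s.length + 1) s [] [] (by omega)]
  exact nmGo_no_sep c s [] [] (by simp) (by simp)

theorem rstrip_no_sep (c : Char) (l : List Char) (h : c ∉ l) : c ∉ PySem.Chars.rstrip l := by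
  unfold PySem.Chars.rstrip
  intro hm
  rw [List.mem_reverse] at hm
  exact h (by simpa using (List.dropWhile_sublist _).mem hm)

theorem join_append_singleton (c : Char) (xs : List (List Char)) (y : List Char) (h : xs ≠ []) :
    PySem.Chars.join [c] (xs ++ [y]) = PySem.Chars.join [c] xs ++ [c] ++ y := by
  induction xs with
  | nil => exact absurd rfl h
  | cons l rest ih =>
    cases rest with
    | nil => simp [PySem.Chars.join_singleton, PySem.Chars.join_cons_cons]
    | cons l' rest' =>
      have hsplit : ((l :: l' :: rest') ++ [y]) = l :: ((l' :: rest') ++ [y]) := by simp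
      have hsplit2 : ((l' :: rest') ++ [y]) = l' :: (rest' ++ [y]) := by simp
      rw [hsplit, hsplit2, PySem.Chars.join_cons_cons, ← hsplit2, ih (by simp),
        PySem.Chars.join_cons_cons]
      simp

theorem join_reverse (c : Char) (ns : List (List Char)) :
    (PySem.Chars.join [c] ns).reverse = PySem.Chars.join [c] (ns.reverse.map List.reverse) := by
  induction ns with
  | nil => simp [PySem.Chars.join_nil]
  | cons l rest ih =>
    cases rest with
    | nil => simp [PySem.Chars.join_singleton]
    | cons l' rest' =>
      rw [PySem.Chars.join_cons_cons, List.reverse_append, List.reverse_append, ih]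
      have hne : ((l' :: rest').reverse.map List.reverse) ≠ [] := by simp
      have : (l :: l' :: rest').reverse.map List.reverse
          = ((l' :: rest').reverse.map List.reverse) ++ [l.reverse] := by simp
      rw [this, join_append_singleton c _ _ hne]
      simp

theorem dropWhile_join (c : Char) (ns : List (List Char)) (h : ∀ l ∈ ns, c ∉ l) :
    List.dropWhile (fun x => ([c] : List Char).contains x) (PySem.Chars.join [c] ns)
      = PySem.Chars.join [c] (nmStripLead ns) := by
  induction ns with
  | nil => simp [PySem.Chars.join_nil, nmStripLead]
  | cons l rest ih =>
    have hl : c ∉ l := h l (by simp)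
    have hrest : ∀ l' ∈ rest, c ∉ l' := fun l' hm => h l' (by simp [hm])
    cases rest with
    | nil =>
      cases l with
      | nil => simp [PySem.Chars.join_singleton, nmStripLead, PySem.Chars.join_nil]
      | cons a t =>
        have ha : ¬ (a = c) := by intro hh; subst hh; exact hl (List.mem_cons_self ..)
        simp [PySem.Chars.join_singleton, nmStripLead, ha]
    | cons l' rest' =>
      rw [PySem.Chars.join_cons_cons]
      cases l with
      | nil =>
        simp only [List.nil_append, List.cons_append, List.dropWhile_cons]
        have hc : (([c] : List Char).contains c) = true := by simp
        rw [hc]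
        simp only [if_true]
        rw [ih hrest]
        simp [nmStripLead]
      | cons a t =>
        have ha : ¬ (a = c) := by intro hh; subst hh; exact hl (List.mem_cons_self ..)
        simp only [List.cons_append, List.dropWhile_cons]
        have hcontains : (([c] : List Char).contains a) = false := by simp [ha]
        rw [hcontains]
        simp only [Bool.false_eq_true, if_false, nmStripLead]
        have hne : ((a :: t).isEmpty) = false := by simp
        rw [hne]
        simp [PySem.Chars.join_cons_cons]

theorem nmStripLead_map_reverse (ns : List (List Char)) :
    nmStripLead (ns.map List.reverse) = (nmStripLead ns).map List.reverse := by
  induction ns with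
  | nil => rfl
  | cons l rest ih =>
    by_cases hl : l.isEmpty
    · have : l = [] := by simpa [List.isEmpty_iff] using hl
      subst this
      simpa [nmStripLead] using ih
    · have hlr : (l.reverse).isEmpty = false := by
        simp only [List.isEmpty_eq_false_iff] at *
        simpa using hl
      simp [nmStripLead, hl, hlr]

theorem nmStripLead_no_sep (c : Char) (ns : List (List Char)) (h : ∀ l ∈ ns, c ∉ l) :
    ∀ l ∈ nmStripLead ns, c ∉ l := by
  induction ns with
  | nil => simp [nmStripLead]
  | cons l rest ih =>
    by_cases hl : l.isEmpty
    · simpa [nmStripLead, hl] using ih (fun l' hm => h l' (by simp [hm]))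
    · simpa [nmStripLead, hl] using h

theorem strip_join (c : Char) (ns : List (List Char)) (h : ∀ l ∈ ns, c ∉ l) :
    PySem.Chars.stripChars (PySem.Chars.join [c] ns) [c]
      = PySem.Chars.join [c] (nmStripTrail (nmStripLead ns)) := by
  have key : PySem.Chars.stripChars (PySem.Chars.join [c] ns) [c]
      = (List.dropWhile (fun x => ([c] : List Char).contains x)
          ((List.dropWhile (fun x => ([c] : List Char).contains x)
            (PySem.Chars.join [c] ns)).reverse)).reverse := rfl
  rw [key]
  set ns1 := nmStripLead ns with hns1
  have h1 : ∀ l ∈ ns1, c ∉ l := nmStripLead_no_sep c ns h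
  rw [dropWhile_join c ns h, ← hns1, join_reverse]
  have h2 : ∀ l ∈ ns1.reverse.map List.reverse, c ∉ l := by
    intro l hm
    simp only [List.mem_map, List.mem_reverse] at hm
    obtain ⟨l', hl', rfl⟩ := hm
    simpa using h1 l' hl'
  rw [dropWhile_join c _ h2, nmStripLead_map_reverse, join_reverse]
  congr 1
  unfold nmStripTrail
  simp [List.map_reverse, List.map_map, Function.comp]

theorem final_str (ns : List (List Char)) (h : ∀ l ∈ ns, '\n' ∉ l) :
    String.ofList (PySem.Chars.join ['\n'] (nmStripTrail (nmStripLead ns)))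
      = PySem.Str.stripChars (String.ofList (PySem.Chars.join ['\n'] ns)) "\n" := by
  have e : PySem.Str.stripChars (String.ofList (PySem.Chars.join ['\n'] ns)) "\n"
      = String.ofList (PySem.Chars.stripChars
          (String.ofList (PySem.Chars.join ['\n'] ns)).toList ("\n" : String).toList) := rfl
  have e2 : (String.ofList (PySem.Chars.join ['\n'] ns)).toList
      = PySem.Chars.join ['\n'] ns := by simp
  have e3 : ("\n" : String).toList = ['\n'] := by decide
  rw [e, e2, e3, strip_join '\n' ns h]

-- ===== VERDICT (by name: the statement is the Claim_ definition above) =====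
theorem normalize_markdown_spec : Claim_equal_normalize_markdown := by
  intro text _
  unfold Spec_normalize_markdown normalize_markdown normalize_markdown_alt
  exact final_str _ (fun l hm => by
    obtain ⟨l', hl', rfl⟩ := List.mem_map.mp hm
    exact rstrip_no_sep _ _ (splitOn_no_sep '\n' _ l' hl'))
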